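-- pv_equiv track=rewrite | github.com/juancamilovega/SHIP | ship_params.py | parse_ip_subnet
-- ===== SOURCE A (Python) =====
-- def parse_ip (input_str):
--     ip = input_str.split('.')
--     ip_addr = '0x'
--     if (len(ip) != 4):
--         return('',-1)
--     for element in ip:
--         if (element.strip().isdigit() and int(element) <= 255):
--             new_elem = '' + hex(int(element))
--             if (len(new_elem) == 3):
--                 ip_addr = ip_addr + '0' + new_elem[2].upper()
--             else:
--                 ip_addr = ip_addr + new_elem[2:4].upper()
--         else:
--             return('',-1)
--     return(ip_addr,0)
--
-- def parse_ip_subnet (input_str):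
--     split_ip = input_str.split('/')
--     a,b = parse_ip(split_ip[0])
--     if (b!= 0):
--         return ('','',-1)
--     if (split_ip[1].strip().isdigit() and (int(split_ip[1]) <= 32) ):
--         mask = int(split_ip[1])
--         sub_ip = '0x'
--         for i in range(4):
--             if (mask >= 8):
--                 sub_ip = sub_ip + 'FF'
--                 mask = mask - 8
--             elif (mask == 7):
--                 sub_ip = sub_ip + 'FE'
--                 mask = 0
--             elif (mask == 6):
--                 sub_ip = sub_ip + 'FC'
--                 mask = 0
--             elif (mask == 5):
--                 sub_ip = sub_ip + 'F8'
--                 mask = 0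
--             elif (mask == 4):
--                 sub_ip = sub_ip + 'F0'
--                 mask = 0
--             elif (mask == 3):
--                 sub_ip = sub_ip + 'E0'
--                 mask = 0
--             elif (mask == 2):
--                 sub_ip = sub_ip + 'C0'
--                 mask = 0
--             elif (mask == 1):
--                 sub_ip = sub_ip + '80'
--                 mask = 0
--             elif (mask == 0):
--                 sub_ip = sub_ip + '00'
--                 mask = 0
--         return (a,sub_ip,0)
--     return('','',-1)
-- ===== SOURCE B (Python) =====
-- def parse_ip_subnet(input_str):
--     parts = input_str.split('/')
--     octets = parts[0].split('.')
--     if len(octets) != 4: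
--         return ('', '', -1)
--     vals = []
--     for o in octets:
--         if not (o.strip().isdigit() and int(o) <= 255):
--             return ('', '', -1)
--         vals.append(int(o))
--     m = parts[1]
--     if not (m.strip().isdigit() and int(m) <= 32):
--         return ('', '', -1)
--     mask = int(m)
--     addr = '0x' + ''.join('%02X' % v for v in vals)
--     mask_val = (0xFFFFFFFF << (32 - mask)) & 0xFFFFFFFF
--     return (addr, '0x%08X' % mask_val, 0)
-- ===== Notes on version B (the rewrite author's own statement) =====
-- stated objective: idiomatic
-- what changed: A builds the address octet-by-octet with hex() string surgery (branching on the hex-string length) and builds the mask via a four-iteration nine-way branch ladder; B collects the parsed octet values once and formats each as two-digit uppercase hex, and computes the mask value as a closed-form shifted 32-bit bitmask formatted once as eight-digit uppercase hex.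
import Mathlib
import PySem

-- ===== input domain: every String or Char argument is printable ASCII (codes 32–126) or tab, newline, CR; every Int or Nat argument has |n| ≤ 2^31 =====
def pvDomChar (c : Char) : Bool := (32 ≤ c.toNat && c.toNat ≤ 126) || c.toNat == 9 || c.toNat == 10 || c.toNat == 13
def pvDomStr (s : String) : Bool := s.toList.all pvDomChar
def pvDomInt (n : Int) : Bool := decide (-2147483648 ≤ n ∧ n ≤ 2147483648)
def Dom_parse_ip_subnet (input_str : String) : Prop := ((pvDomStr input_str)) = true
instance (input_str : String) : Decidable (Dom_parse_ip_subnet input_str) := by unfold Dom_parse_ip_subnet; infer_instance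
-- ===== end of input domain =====

-- B replaces A's byte-by-byte branch ladders (hex() string surgery per octet, a 9-way if ladder per mask byte)
-- by fixed-width uppercase-hex formatting of the collected octet values and of the closed-form shifted bitmask (idiomatic; equal return values on Pre_).

-- ===== PORT A =====

-- Python hex digit (lowercase), and the digits of n in hex (most significant first; [] for 0).
def pvHexDigitL (n : Nat) : Char := if n < 10 then Char.ofNat (48 + n) else Char.ofNat (87 + n)

-- fuel-bounded so the kernel can evaluate it; exact for n < 16^17 (here n ≤ 255 / < 2^32)
def pvHexCharsL : Nat → Nat → List Char
  | 0, _ => []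
  | _ + 1, 0 => []
  | fuel + 1, n => pvHexCharsL fuel (n / 16) ++ [pvHexDigitL (n % 16)]

-- Python hex(v): '0x' prefix, lowercase, '-0x' for negatives, '0x0' for 0.
def pvHexStr (v : Int) : String :=
  if v < 0 then "-0x" ++ (if v.natAbs = 0 then "0" else String.ofList (pvHexCharsL 17 v.natAbs))
  else "0x" ++ (if v.toNat = 0 then "0" else String.ofList (pvHexCharsL 17 v.toNat))

-- the 'for element in ip' loop of parse_ip (early return ('',-1) on an invalid octet)
def pvParseIpLoop : List String → String → String × Int
  | [], ip_addr => (ip_addr, 0)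
  | e :: rest, ip_addr =>
    if PySem.Str.strIsdigit (PySem.Str.strip e) && decide ((PySem.Int.ofStr? e).getD 0 ≤ 255) then
      let new_elem := "" ++ pvHexStr ((PySem.Int.ofStr? e).getD 0)
      if PySem.Str.len new_elem == 3 then
        -- new_elem[2].upper(): index 2 is in range since len = 3 (getD unreachable)
        pvParseIpLoop rest (ip_addr ++ "0" ++ PySem.Str.upper (String.ofList [(PySem.Str.pyGet? new_elem 2).getD ' ']))
      else
        pvParseIpLoop rest (ip_addr ++ PySem.Str.upper (PySem.Str.slice new_elem (some 2) (some 4)))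
    else ("", -1)

def parse_ip (input_str : String) : String × Int :=
  let ip := (PySem.Str.split? input_str ".").getD []   -- separator '.' nonempty, split? never none
  if ip.length ≠ 4 then ("", -1)
  else pvParseIpLoop ip "0x"

-- one iteration of the 'for i in range(4)' mask ladder, state (sub_ip, mask)
def pvMaskStep (st : String × Int) : String × Int :=
  if st.2 ≥ 8 then (st.1 ++ "FF", st.2 - 8)
  else if st.2 = 7 then (st.1 ++ "FE", 0)
  else if st.2 = 6 then (st.1 ++ "FC", 0)
  else if st.2 = 5 then (st.1 ++ "F8", 0)
  else if st.2 = 4 then (st.1 ++ "F0", 0)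
  else if st.2 = 3 then (st.1 ++ "E0", 0)
  else if st.2 = 2 then (st.1 ++ "C0", 0)
  else if st.2 = 1 then (st.1 ++ "80", 0)
  else if st.2 = 0 then (st.1 ++ "00", 0)
  else st

def parse_ip_subnet (input_str : String) : String × String × Int :=
  let split_ip := (PySem.Str.split? input_str "/").getD []   -- separator '/' nonempty, split? never none
  let ab := parse_ip ((PySem.List.pyGet? split_ip 0).getD "")  -- split_ip is never empty, index 0 in range
  if ab.2 ≠ 0 then ("", "", -1)
  else
    match PySem.List.pyGet? split_ip 1 with
    | none => ("", "", -2)   -- Python raises IndexError here; excluded by Pre_ (value arbitrary)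
    | some s1 =>
      if PySem.Str.strIsdigit (PySem.Str.strip s1) && decide ((PySem.Int.ofStr? s1).getD 0 ≤ 32) then
        let mask := (PySem.Int.ofStr? s1).getD 0
        let res := (PySem.List.pyRange 0 4 1).foldl (fun st _ => pvMaskStep st) ("0x", mask)
        (ab.1, res.1, 0)
      else ("", "", -1)

-- ===== PORT B =====

-- uppercase hex digit
def pvHexDigitU (n : Nat) : Char := if n < 10 then Char.ofNat (48 + n) else Char.ofNat (55 + n)

-- fuel-bounded so the kernel can evaluate it; exact for n < 16^17 (here n ≤ 255 / < 2^32)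
def pvHexCharsU : Nat → Nat → List Char
  | 0, _ => []
  | _ + 1, 0 => []
  | fuel + 1, n => pvHexCharsU fuel (n / 16) ++ [pvHexDigitU (n % 16)]

-- Python '%0wX' % n for n ≥ 0: uppercase hex, left-padded with '0' to width w
def pvHexPad (w : Nat) (n : Nat) : String :=
  let ds := if n = 0 then ['0'] else pvHexCharsU 17 n
  String.ofList (List.replicate (w - ds.length) '0' ++ ds)

-- the octet-collecting loop of B (None = early return ('','',-1))
def pvCollect : List String → List Int → Option (List Int)
  | [], acc => some acc
  | o :: rest, acc =>
    if !(PySem.Str.strIsdigit (PySem.Str.strip o) && decide ((PySem.Int.ofStr? o).getD 0 ≤ 255)) then none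
    else pvCollect rest (acc ++ [(PySem.Int.ofStr? o).getD 0])

def parse_ip_subnet_alt (input_str : String) : String × String × Int :=
  let parts := (PySem.Str.split? input_str "/").getD []   -- separator '/' nonempty, split? never none
  let octets := (PySem.Str.split? ((PySem.List.pyGet? parts 0).getD "") ".").getD []
  if octets.length ≠ 4 then ("", "", -1)
  else
    match pvCollect octets [] with
    | none => ("", "", -1)
    | some vals =>
      match PySem.List.pyGet? parts 1 with
      | none => ("", "", -1)   -- Source B raises IndexError here; excluded by Pre_
      | some m =>
        if PySem.Str.strIsdigit (PySem.Str.strip m) && decide ((PySem.Int.ofStr? m).getD 0 ≤ 32) then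
          let mask := (PySem.Int.ofStr? m).getD 0
          -- '%02X' % v: v ≥ 0 under the isdigit guard, so .toNat is exact
          let addr := "0x" ++ PySem.Str.join "" (vals.map (fun v => pvHexPad 2 v.toNat))
          -- (0xFFFFFFFF << (32 - mask)) & 0xFFFFFFFF: 0 ≤ mask ≤ 32 under the guard, so .toNat is exact
          let mask_val : Nat := (0xFFFFFFFF <<< (32 - mask).toNat) &&& 0xFFFFFFFF
          (addr, "0x" ++ pvHexPad 8 mask_val, 0)
        else ("", "", -1)

-- ===== PRECONDITION & SPEC =====

-- helper for Pre_: the dotted-quad shape check of the part before '/' (4 '.'-separated octets,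
-- each digits-only after stripping and ≤ 255)
def pvIpOk (s : String) : Bool :=
  let oc := (PySem.Str.split? s ".").getD []
  oc.length == 4 && oc.all (fun o => PySem.Str.strIsdigit (PySem.Str.strip o) && decide ((PySem.Int.ofStr? o).getD 0 ≤ 255))

-- Pre_ excludes exactly the inputs on which the Python A raises IndexError: strings with no '/'
-- (so the '/'-split has a single piece) whose whole text is a valid dotted quad, reaching split_ip[1].
def Pre_parse_ip_subnet (input_str : String) : Prop :=
  2 ≤ ((PySem.Str.split? input_str "/").getD []).length ∨
    pvIpOk ((PySem.List.pyGet? ((PySem.Str.split? input_str "/").getD []) 0).getD "") = false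
instance (input_str : String) : Decidable (Pre_parse_ip_subnet input_str) := by unfold Pre_parse_ip_subnet; infer_instance

def pvWitness_parse_ip_subnet : String := "10.0.0.1/24"

def Spec_parse_ip_subnet (input_str : String) (out : String × String × Int) : Prop := out = parse_ip_subnet_alt input_str
instance (input_str : String) (out : String × String × Int) : Decidable (Spec_parse_ip_subnet input_str out) := by unfold Spec_parse_ip_subnet; infer_instance

-- ===== CLAIM (what is proved, stated in full; the proofs are below) =====
def Claim_equal_parse_ip_subnet : Prop := ∀ (input_str : String), Dom_parse_ip_subnet input_str → Pre_parse_ip_subnet input_str → Spec_parse_ip_subnet input_str (parse_ip_subnet input_str)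

-- ===== LEMMAS AND PROOFS =====

-- a non-p element survives dropWhile p
theorem pv_mem_dropWhile {α : Type} {p : α → Bool} {c : α} : ∀ {l : List α}, c ∈ l → p c = false → c ∈ l.dropWhile p := by
  intro l hc hp
  induction l with
  | nil => cases hc
  | cons a t ih =>
    by_cases ha : p a = true
    · rw [List.dropWhile_cons_of_pos ha]
      rcases List.mem_cons.mp hc with h | h
      · subst h; rw [hp] at ha; cases ha
      · exact ih h
    · rw [List.dropWhile_cons_of_neg ha]
      exact hc

-- a negative int(...) value can only come from a '-' sign in the string
theorem pv_neg_ofChars_mem {cs : List Char} {v : Int} (h : PySem.Int.ofChars? cs = some v) (hv : v < 0) : '-' ∈ cs := by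
  unfold PySem.Int.ofChars? at h
  dsimp only [] at h
  split at h
  case _ ds heq =>
    have hm : '-' ∈ (List.dropWhile PySem.Int.isIntSpace (List.dropWhile PySem.Int.isIntSpace cs).reverse).reverse := by
      rw [heq]; exact List.mem_cons_self
    rw [List.mem_reverse] at hm
    have hm2 := (List.dropWhile_sublist (l := (List.dropWhile PySem.Int.isIntSpace cs).reverse) (p := PySem.Int.isIntSpace)).subset hm
    rw [List.mem_reverse] at hm2
    exact (List.dropWhile_sublist (l := cs) (p := PySem.Int.isIntSpace)).subset hm2
  case _ ds heq =>
    simp only [Option.map_eq_some_iff, bind, Option.bind_eq_some_iff, Option.pure_def,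
      Option.some.injEq] at h
    rcases h with ⟨a, ⟨b, hb, rfl⟩, rfl⟩
    omega
  case _ heq h1 h2 =>
    simp only [Option.map_eq_some_iff, bind, Option.bind_eq_some_iff, Option.pure_def,
      Option.some.injEq] at h
    rcases h with ⟨a, ⟨b, hb, rfl⟩, rfl⟩
    omega

-- a digits-only (after strip) string parses to a nonnegative value (or fails)
theorem pv_digit_nonneg {e : String} (hd : PySem.Str.strIsdigit (PySem.Str.strip e) = true) :
    0 ≤ (PySem.Int.ofStr? e).getD 0 := by
  cases h : PySem.Int.ofStr? e with
  | none => simp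
  | some v =>
    simp only [Option.getD_some]
    by_contra hneg
    rw [not_le] at hneg
    have hmem : '-' ∈ e.toList := pv_neg_ofChars_mem (cs := e.toList) h hneg
    -- '-' is no whitespace, so it survives strip …
    have h1 : '-' ∈ PySem.Chars.lstrip e.toList :=
      pv_mem_dropWhile hmem (by decide)
    have h2 : '-' ∈ PySem.Chars.strip e.toList := by
      unfold PySem.Chars.strip PySem.Chars.rstrip
      rw [List.mem_reverse]
      exact pv_mem_dropWhile (List.mem_reverse.mpr h1) (by decide)
    -- … contradicting that the stripped string is all digits
    have hd' : PySem.Chars.strIsdigit (PySem.Chars.strip e.toList) = true := by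
      have := hd
      unfold PySem.Str.strIsdigit at this
      rwa [PySem.Str.toList_strip] at this
    unfold PySem.Chars.strIsdigit at hd'
    have := (List.all_eq_true.mp (Bool.and_elim_right hd')) _ h2
    simp [PySem.Chars.isdigit] at this

-- per-octet agreement: A's hex()-surgery chunk equals B's '%02X' formatting, for 0 ≤ v ≤ 255
def pvChunkA (v : Int) : String :=
  let new_elem := "" ++ pvHexStr v
  if PySem.Str.len new_elem == 3 then
    "0" ++ PySem.Str.upper (String.ofList [(PySem.Str.pyGet? new_elem 2).getD ' '])
  else
    PySem.Str.upper (PySem.Str.slice new_elem (some 2) (some 4))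

set_option maxRecDepth 40000 in
theorem pv_chunk_fin : ∀ n : Fin 256, pvChunkA ((n : Nat) : Int) = pvHexPad 2 (n : Nat) := by decide

-- the A loop appends the chunk (re-associated) or fails
theorem pv_loop_cons (e : String) (rest : List String) (acc : String) :
    pvParseIpLoop (e :: rest) acc =
      if PySem.Str.strIsdigit (PySem.Str.strip e) && decide ((PySem.Int.ofStr? e).getD 0 ≤ 255) then
        pvParseIpLoop rest (acc ++ pvChunkA ((PySem.Int.ofStr? e).getD 0))
      else ("", -1) := by
  rw [pvParseIpLoop]
  unfold pvChunkA
  split_ifs with h1 <;> [skip; rfl]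
  dsimp only []
  split_ifs <;> simp [String.append_assoc]

-- B's mask formatting equals A's ladder, for 0 ≤ mask ≤ 32 (finite check)
theorem pv_mask_fin : ∀ n : Fin 33,
    ((PySem.List.pyRange 0 4 1).foldl (fun st _ => pvMaskStep st) ("0x", ((n : Nat) : Int))).1
      = "0x" ++ pvHexPad 8 ((0xFFFFFFFF <<< (32 - ((n : Nat) : Int)).toNat) &&& 0xFFFFFFFF) := by decide

theorem pv_join4 (a b c d : String) : PySem.Str.join "" [a, b, c, d] = a ++ (b ++ (c ++ d)) := by
  have h : (PySem.Str.join "" [a, b, c, d]).toList = (a ++ (b ++ (c ++ d))).toList := by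
    simp [PySem.Str.toList_join, PySem.Chars.join_cons_cons, PySem.Chars.join_singleton]
  have := congrArg String.ofList h
  simpa [String.ofList_toList] using this

theorem pv_cond_bounds {e : String} {b : Int}
    (hc : (PySem.Str.strIsdigit (PySem.Str.strip e) && decide ((PySem.Int.ofStr? e).getD 0 ≤ b)) = true) :
    0 ≤ (PySem.Int.ofStr? e).getD 0 ∧ (PySem.Int.ofStr? e).getD 0 ≤ b := by
  rcases Bool.and_eq_true_iff.mp hc with ⟨h1, h2⟩
  exact ⟨pv_digit_nonneg h1, of_decide_eq_true h2⟩

theorem pv_cond_true {e : String} {b : Int}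
    (h : (PySem.Str.strIsdigit (PySem.Str.strip e) && decide ((PySem.Int.ofStr? e).getD 0 ≤ b)) = true) :
    ¬(PySem.Chars.strIsdigit (PySem.Chars.strip e.toList) = false ∨ b < (PySem.Int.ofStr? e).getD 0) := by
  rcases Bool.and_eq_true_iff.mp h with ⟨h1, h2⟩
  unfold PySem.Str.strIsdigit at h1
  rw [PySem.Str.toList_strip] at h1
  simp [h1, of_decide_eq_true h2, not_lt]

theorem pv_cond_false {e : String} {b : Int}
    (h : (PySem.Str.strIsdigit (PySem.Str.strip e) && decide ((PySem.Int.ofStr? e).getD 0 ≤ b)) = false) :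
    PySem.Chars.strIsdigit (PySem.Chars.strip e.toList) = false ∨ b < (PySem.Int.ofStr? e).getD 0 := by
  rcases Bool.and_eq_false_iff.mp h with h1 | h2
  · left
    unfold PySem.Str.strIsdigit at h1
    rwa [PySem.Str.toList_strip] at h1
  · right
    simpa [not_le] using of_decide_eq_false h2

theorem pv_chunk_eq {v : Int} (h0 : 0 ≤ v) (h255 : v ≤ 255) : pvChunkA v = pvHexPad 2 v.toNat := by
  have := pv_chunk_fin ⟨v.toNat, by omega⟩
  simpa [Int.toNat_of_nonneg h0] using this

theorem pv_mask_eq {v : Int} (h0 : 0 ≤ v) (h32 : v ≤ 32) :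
    ((PySem.List.pyRange 0 4 1).foldl (fun st _ => pvMaskStep st) ("0x", v)).1
      = "0x" ++ pvHexPad 8 ((0xFFFFFFFF <<< (32 - v).toNat) &&& 0xFFFFFFFF) := by
  have := pv_mask_fin ⟨v.toNat, by omega⟩
  simpa [Int.toNat_of_nonneg h0] using this

-- ===== VERDICT (by name: the statement is the Claim_ definition above) =====
theorem parse_ip_subnet_spec : Claim_equal_parse_ip_subnet := by
  intro s _ hpre
  unfold Spec_parse_ip_subnet parse_ip_subnet parse_ip_subnet_alt parse_ip
  dsimp only []
  set parts := (PySem.Str.split? s "/").getD [] with hparts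
  set p0 := (PySem.List.pyGet? parts 0).getD "" with hp0
  set oc := (PySem.Str.split? p0 ".").getD [] with hoc
  by_cases h4 : oc.length = 4
  case neg => simp [h4]
  rcases oc with _ | ⟨e1, _ | ⟨e2, _ | ⟨e3, _ | ⟨e4, _ | rest⟩⟩⟩⟩ <;> simp only [List.length] at h4 <;> try omega
  simp only [List.length_cons, List.length_nil, ne_eq, Nat.reduceAdd, not_true_eq_false,
    if_false]
  by_cases c1 : (PySem.Str.strIsdigit (PySem.Str.strip e1) && decide ((PySem.Int.ofStr? e1).getD 0 ≤ 255)) = true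
  case neg =>
    rw [pv_loop_cons, if_neg c1]
    have h := Bool.eq_false_iff.mpr c1
    simp [pvCollect, pv_cond_false h]
  by_cases c2 : (PySem.Str.strIsdigit (PySem.Str.strip e2) && decide ((PySem.Int.ofStr? e2).getD 0 ≤ 255)) = true
  case neg =>
    rw [pv_loop_cons, if_pos c1, pv_loop_cons, if_neg c2]
    have h := Bool.eq_false_iff.mpr c2
    simp [pvCollect, pv_cond_true c1, pv_cond_false h]
  by_cases c3 : (PySem.Str.strIsdigit (PySem.Str.strip e3) && decide ((PySem.Int.ofStr? e3).getD 0 ≤ 255)) = true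
  case neg =>
    rw [pv_loop_cons, if_pos c1, pv_loop_cons, if_pos c2, pv_loop_cons, if_neg c3]
    have h := Bool.eq_false_iff.mpr c3
    simp [pvCollect, pv_cond_true c1, pv_cond_true c2, pv_cond_false h]
  by_cases c4 : (PySem.Str.strIsdigit (PySem.Str.strip e4) && decide ((PySem.Int.ofStr? e4).getD 0 ≤ 255)) = true
  case neg =>
    rw [pv_loop_cons, if_pos c1, pv_loop_cons, if_pos c2, pv_loop_cons, if_pos c3,
      pv_loop_cons, if_neg c4]
    have h := Bool.eq_false_iff.mpr c4
    simp [pvCollect, pv_cond_true c1, pv_cond_true c2, pv_cond_true c3, pv_cond_false h]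
  rw [pv_loop_cons, if_pos c1, pv_loop_cons, if_pos c2, pv_loop_cons, if_pos c3,
    pv_loop_cons, if_pos c4]
  have hcollect : pvCollect [e1, e2, e3, e4] [] =
      some [(PySem.Int.ofStr? e1).getD 0, (PySem.Int.ofStr? e2).getD 0,
        (PySem.Int.ofStr? e3).getD 0, (PySem.Int.ofStr? e4).getD 0] := by
    simp [pvCollect]
    exact ⟨⟨by simpa [PySem.Str.strIsdigit, PySem.Str.toList_strip] using (Bool.and_eq_true_iff.mp c1).1, (pv_cond_bounds c1).2⟩,
      ⟨by simpa [PySem.Str.strIsdigit, PySem.Str.toList_strip] using (Bool.and_eq_true_iff.mp c2).1, (pv_cond_bounds c2).2⟩,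
      ⟨by simpa [PySem.Str.strIsdigit, PySem.Str.toList_strip] using (Bool.and_eq_true_iff.mp c3).1, (pv_cond_bounds c3).2⟩,
      ⟨by simpa [PySem.Str.strIsdigit, PySem.Str.toList_strip] using (Bool.and_eq_true_iff.mp c4).1, (pv_cond_bounds c4).2⟩⟩
  rw [hcollect]
  simp only [pvParseIpLoop, not_true, if_false]
  cases hm : PySem.List.pyGet? parts 1 with
  | none =>
    -- inside Pre_ this branch is unreachable: the dotted quad is valid, so s contains '/'
    exfalso
    rcases hpre with hlen | hok
    · rw [show (1 : Int) = ((1 : Nat) : Int) from rfl, PySem.List.pyGet?_natCast] at hm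
      rw [List.getElem?_eq_none_iff] at hm
      rw [← hparts] at hlen
      omega
    · rw [← hparts, ← hp0] at hok
      apply absurd hok
      unfold pvIpOk
      dsimp only []
      rw [← hoc]
      simp
      refine ⟨?_, (pv_cond_bounds c1).2, ?_, (pv_cond_bounds c2).2, ?_, (pv_cond_bounds c3).2, ?_, (pv_cond_bounds c4).2⟩
      · simpa [PySem.Str.strIsdigit, PySem.Str.toList_strip] using (Bool.and_eq_true_iff.mp c1).1
      · simpa [PySem.Str.strIsdigit, PySem.Str.toList_strip] using (Bool.and_eq_true_iff.mp c2).1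
      · simpa [PySem.Str.strIsdigit, PySem.Str.toList_strip] using (Bool.and_eq_true_iff.mp c3).1
      · simpa [PySem.Str.strIsdigit, PySem.Str.toList_strip] using (Bool.and_eq_true_iff.mp c4).1
  | some m =>
    dsimp only []
    by_cases cm : (PySem.Str.strIsdigit (PySem.Str.strip m) && decide ((PySem.Int.ofStr? m).getD 0 ≤ 32)) = true
    case neg => rw [if_neg cm, if_neg cm]
    rw [if_pos cm, if_pos cm]
    obtain ⟨hm0, hm32⟩ := pv_cond_bounds cm
    obtain ⟨h10, h1b⟩ := pv_cond_bounds c1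
    obtain ⟨h20, h2b⟩ := pv_cond_bounds c2
    obtain ⟨h30, h3b⟩ := pv_cond_bounds c3
    obtain ⟨h40, h4b⟩ := pv_cond_bounds c4
    rw [pv_chunk_eq h10 h1b, pv_chunk_eq h20 h2b, pv_chunk_eq h30 h3b, pv_chunk_eq h40 h4b,
      pv_mask_eq hm0 hm32, List.map, List.map, List.map, List.map, List.map, pv_join4]
    simp [String.append_assoc]
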